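-- pv_equiv track=rewrite | github.com/agatalenz/ALK | 3.py | subsetToBinary
-- ===== SOURCE A (Python) =====
-- def subsetToBinary(subset, n):
--
--     binary = [0] * n
--     for i in range(n):
--         if subset.count(i+1) == 1:
--             binary[i] = 1
--         else:
--             binary[i] = 0
--     return binary
-- ===== SOURCE B (Python) =====
-- def subsetToBinary(subset, n):
--     counts = {}
--     for x in subset:
--         counts[x] = counts.get(x, 0) + 1
--     binary = [0] * n
--     for x, c in counts.items():
--         if c == 1 and 1 <= x <= n:
--             binary[x - 1] = 1
--     return binary
-- ===== Notes on version B (the rewrite author's own statement) =====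
-- stated objective: faster
-- what changed: One frequency-dict pass over subset plus one pass over its distinct keys replaces the per-index rescan subset.count(i+1) for every i in range(n).
import Mathlib
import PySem

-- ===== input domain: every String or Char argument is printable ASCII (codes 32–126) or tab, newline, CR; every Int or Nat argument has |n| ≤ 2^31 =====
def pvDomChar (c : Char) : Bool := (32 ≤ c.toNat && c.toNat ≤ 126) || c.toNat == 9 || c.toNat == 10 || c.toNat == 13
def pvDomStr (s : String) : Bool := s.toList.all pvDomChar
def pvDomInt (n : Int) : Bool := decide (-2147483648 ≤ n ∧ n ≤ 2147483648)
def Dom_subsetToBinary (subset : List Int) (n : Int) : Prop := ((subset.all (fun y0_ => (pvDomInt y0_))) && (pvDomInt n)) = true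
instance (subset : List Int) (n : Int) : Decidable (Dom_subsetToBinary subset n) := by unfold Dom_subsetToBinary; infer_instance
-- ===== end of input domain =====

-- B replaces A's per-index rescan subset.count(i+1) by one frequency-dict pass plus a pass over the distinct keys (objective: faster).

-- ===== PORT A =====
def subsetToBinary (subset : List Int) (n : Int) : List Int :=
  let binary := List.replicate n.toNat (0 : Int)
  (PySem.List.pyRange 0 n 1).foldl
    (fun b i =>
      if subset.count (i + 1) = 1 then PySem.List.pySetD b i 1
      else PySem.List.pySetD b i 0)
    binary

-- ===== PORT B =====
def subsetToBinary_alt (subset : List Int) (n : Int) : List Int :=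
  let counts := subset.foldl (fun d x => d.insert x (d.getD x 0 + 1)) (PySem.Dict.empty : PySem.Dict Int Int)
  let binary := List.replicate n.toNat (0 : Int)
  counts.items.foldl
    (fun b p => if p.2 = 1 ∧ 1 ≤ p.1 ∧ p.1 ≤ n then PySem.List.pySetD b (p.1 - 1) 1 else b)
    binary

-- ===== PRECONDITION & SPEC =====
def Spec_subsetToBinary (subset : List Int) (n : Int) (out : List Int) : Prop := out = subsetToBinary_alt subset n
instance (subset : List Int) (n : Int) (out : List Int) : Decidable (Spec_subsetToBinary subset n out) := by unfold Spec_subsetToBinary; infer_instance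

-- ===== CLAIM (what is proved, stated in full; the proofs are below) =====
def Claim_equal_subsetToBinary : Prop := ∀ (subset : List Int) (n : Int), Dom_subsetToBinary subset n → Spec_subsetToBinary subset n (subsetToBinary subset n)

-- ===== LEMMAS AND PROOFS =====

-- the common closed form: entry k is 1 iff k+1 occurs exactly once in subset
def pvVal (subset : List Int) (k : Nat) : Int := if subset.count ((k : Int) + 1) = 1 then 1 else 0

-- ---- A side ----

theorem pvA_range (subset : List Int) (m : Nat) (b : List Int) :
    (PySem.List.pyRange 0 (m : Int) 1).foldl
      (fun b i =>
        if subset.count (i + 1) = 1 then PySem.List.pySetD b i 1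
        else PySem.List.pySetD b i 0) b
    = (List.range m).foldl (fun b k => b.set k (pvVal subset k)) b := by
  induction m with
  | zero => simp [PySem.List.pyRange_one_eq_nil]
  | succ m ih =>
    have hcast : ((m + 1 : Nat) : Int) = (m : Int) + 1 := by push_cast; ring
    rw [hcast, PySem.List.pyRange_one_succ_right (by positivity), List.foldl_append,
        List.range_succ, List.foldl_append, ih]
    simp only [List.foldl_cons, List.foldl_nil, PySem.List.pySetD_natCast, pvVal]
    split_ifs <;> rfl

theorem pvA_setfold (subset : List Int) (m L : Nat) (hm : m ≤ L) :
    (List.range m).foldl (fun b k => b.set k (pvVal subset k)) (List.replicate L (0 : Int))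
    = (List.range L).map (fun k => if k < m then pvVal subset k else 0) := by
  induction m with
  | zero =>
    simp [List.map_const']
  | succ m ih =>
    rw [List.range_succ, List.foldl_append, ih (by omega)]
    simp only [List.foldl_cons, List.foldl_nil]
    apply List.ext_getElem
    · simp
    · intro j h1 h2
      simp only [List.getElem_set, List.getElem_map, List.getElem_range]
      by_cases hj : m = j
      · simp [hj]
      · simp only [if_neg hj]
        have : j < m ↔ j < m + 1 := by omega
        simp [this]

theorem pvA_closed (subset : List Int) (n : Int) :
    subsetToBinary subset n = (List.range n.toNat).map (pvVal subset) := by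
  unfold subsetToBinary
  by_cases hn : n ≤ 0
  · have h0 : n.toNat = 0 := by omega
    rw [PySem.List.pyRange_one_eq_nil hn, h0]
    simp
  · have hcast : n = (n.toNat : Int) := by omega
    rw [show (PySem.List.pyRange 0 n 1) = PySem.List.pyRange 0 ((n.toNat : Nat) : Int) 1 by rw [← hcast]]
    rw [pvA_range, pvA_setfold subset n.toNat n.toNat le_rfl]
    apply List.map_congr_left
    intro k hk
    simp only [List.mem_range] at hk
    simp [hk]

-- ---- B side ----

-- the step function B's fold performs on each distinct element
def pvG (subset : List Int) (n : Int) (b : List Int) (x : Int) : List Int :=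
  if (subset.count x : Int) = 1 ∧ 1 ≤ x ∧ x ≤ n then PySem.List.pySetD b (x - 1) 1 else b

theorem pvB_fold (subset : List Int) (n : Int) :
    subsetToBinary_alt subset n
    = (PySem.Set.ofList subset).foldl (pvG subset n) (List.replicate n.toNat (0 : Int)) := by
  show ((subset.foldl (fun d x => d.insert x (d.getD x 0 + 1)) (PySem.Dict.empty : PySem.Dict Int Int)).items).foldl
      (fun b p => if p.2 = 1 ∧ 1 ≤ p.1 ∧ p.1 ≤ n then PySem.List.pySetD b (p.1 - 1) 1 else b)
      (List.replicate n.toNat (0 : Int)) = _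
  have h := PySem.Dict.foldl_insert_getD_add_one_eq_counter (κ := Int) subset
  rw [h, PySem.Dict.items_counter, List.foldl_map]
  rfl

theorem pvB_get (subset : List Int) (n : Int) (l : List Int) (b : List Int)
    (hb : b.length = n.toNat) (j : Nat) :
    (l.foldl (pvG subset n) b)[j]?
    = if ((j : Int) + 1 ∈ l ∧ (subset.count ((j : Int) + 1) : Int) = 1 ∧ (j : Int) + 1 ≤ n)
      then some 1 else b[j]? := by
  induction l generalizing b with
  | nil => simp
  | cons x l ih =>
    rw [List.foldl_cons]
    by_cases hc : (subset.count x : Int) = 1 ∧ 1 ≤ x ∧ x ≤ n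
    · have hstep : pvG subset n b x = b.set (x - 1).toNat 1 := by
        unfold pvG
        rw [if_pos hc, PySem.List.pySetD_of_nonneg _ _ (by omega)]
      rw [hstep, ih _ (by simp [hb])]
      by_cases hx : (j : Int) + 1 = x
      · have hxj : (x - 1).toNat = j := by omega
        have hjlen : j < b.length := by omega
        have hbj : (b.set (x - 1).toNat 1)[j]? = some 1 := by
          rw [List.getElem?_set, if_pos hxj, if_pos (by omega)]
        rw [hbj]
        have hmem : (j : Int) + 1 ∈ x :: l := by rw [hx]; exact List.mem_cons_self ..
        have : ((j : Int) + 1 ∈ x :: l ∧ (subset.count ((j : Int) + 1) : Int) = 1 ∧ (j : Int) + 1 ≤ n) := by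
          refine ⟨hmem, ?_, by omega⟩
          rw [hx]; exact hc.1
        rw [if_pos this]
        split_ifs <;> rfl
      · have hbj : (b.set (x - 1).toNat 1)[j]? = b[j]? := by
          rw [List.getElem?_set, if_neg (by omega)]
        rw [hbj]
        have hmem : ((j : Int) + 1 ∈ x :: l) ↔ ((j : Int) + 1 ∈ l) := by
          simp [List.mem_cons, hx]
        simp only [hmem]
    · have hstep : pvG subset n b x = b := by unfold pvG; rw [if_neg hc]
      rw [hstep, ih _ hb]
      by_cases hx : (j : Int) + 1 = x
      · have : ¬ ((subset.count ((j : Int) + 1) : Int) = 1 ∧ (j : Int) + 1 ≤ n) := by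
          rw [hx]
          intro ⟨h1, h2⟩
          exact hc ⟨h1, by omega, h2⟩
        rw [if_neg (by tauto), if_neg (by tauto)]
      · have hmem : ((j : Int) + 1 ∈ x :: l) ↔ ((j : Int) + 1 ∈ l) := by
          simp [List.mem_cons, hx]
        simp only [hmem]

theorem pvB_closed (subset : List Int) (n : Int) :
    subsetToBinary_alt subset n = (List.range n.toNat).map (pvVal subset) := by
  rw [pvB_fold]
  apply List.ext_getElem?
  intro j
  rw [pvB_get subset n _ _ (by simp) j]
  by_cases hj : j < n.toNat
  · have hrhs : ((List.range n.toNat).map (pvVal subset))[j]? = some (pvVal subset j) := by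
      rw [List.getElem?_map, List.getElem?_range hj]; rfl
    rw [hrhs]
    have hle : (j : Int) + 1 ≤ n := by omega
    have hrep : (List.replicate n.toNat (0 : Int))[j]? = some 0 := by
      rw [List.getElem?_replicate, if_pos hj]
    rw [hrep]
    unfold pvVal
    by_cases hcnt : subset.count ((j : Int) + 1) = 1
    · have hmem : (j : Int) + 1 ∈ PySem.Set.ofList subset := by
        rw [PySem.Set.mem_ofList]
        exact List.count_pos_iff.mp (by omega)
      rw [if_pos ⟨hmem, by exact_mod_cast hcnt, hle⟩, if_pos hcnt]
    · rw [if_neg ?_, if_neg hcnt]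
      intro ⟨_, h, _⟩
      exact hcnt (by exact_mod_cast h)
  · have h1 : ((List.range n.toNat).map (pvVal subset))[j]? = none := by
      rw [List.getElem?_eq_none (by simp [Nat.le_of_not_lt hj])]
    have h2 : (List.replicate n.toNat (0 : Int))[j]? = none := by
      rw [List.getElem?_eq_none (by simp [Nat.le_of_not_lt hj])]
    rw [h1, h2, if_neg]
    intro ⟨_, _, hle⟩
    omega

-- ===== VERDICT (by name: the statement is the Claim_ definition above) =====
theorem subsetToBinary_spec : Claim_equal_subsetToBinary := by
  intro subset n _
  unfold Spec_subsetToBinary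
  rw [pvA_closed, pvB_closed]
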